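-- pv_equiv track=rewrite | github.com/EastforTest/api_test | demo05m/demo0509.py | gassWords
-- ===== SOURCE A (Python) =====
-- def Dup2Com(str1,str2):
--     #"".join((lambda x:(x.sort(),x)[1])(list(s)))
--     st1 = set("".join((lambda x:(x.sort(),x)[1])(list(str1))))
--     st2 = set("".join((lambda x:(x.sort(),x)[1])(list(str2))))
--     return True if st1==st2 else False
--
-- def gassWords(str1,str2):
--     res = []
--     for i in str1:
--         for j in str2:
--             if i ==j:
--                 res.append(j)
--                 break
--             elif  Dup2Com(i,j):
--                 res.append(j)
--                 break
--     return res
-- ===== SOURCE B (Python) =====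
-- def gassWords(str1, str2):
--     index = {}
--     for j in str2:
--         k = tuple(sorted(set(j)))
--         if k not in index:
--             index[k] = j
--     res = []
--     for i in str1:
--         k = tuple(sorted(set(i)))
--         if k in index:
--             res.append(index[k])
--     return res
-- ===== Notes on version B (the rewrite author's own statement) =====
-- stated objective: faster
-- what changed: B builds a dict from canonical char-set key (tuple of sorted distinct chars) to the first str2 word once, then answers each str1 word by one lookup, replacing A's per-word rescan of str2 with per-pair sorting/set building.
import Mathlib
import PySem

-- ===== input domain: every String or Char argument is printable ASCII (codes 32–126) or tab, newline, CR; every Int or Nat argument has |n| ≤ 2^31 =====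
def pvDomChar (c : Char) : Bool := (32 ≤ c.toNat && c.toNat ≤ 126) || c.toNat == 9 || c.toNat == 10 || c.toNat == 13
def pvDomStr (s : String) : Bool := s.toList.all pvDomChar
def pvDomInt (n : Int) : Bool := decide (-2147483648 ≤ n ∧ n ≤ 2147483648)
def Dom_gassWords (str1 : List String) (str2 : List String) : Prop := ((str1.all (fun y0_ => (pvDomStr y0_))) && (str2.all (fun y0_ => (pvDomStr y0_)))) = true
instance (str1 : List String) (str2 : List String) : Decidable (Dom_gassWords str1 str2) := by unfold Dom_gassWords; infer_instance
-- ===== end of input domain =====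

-- B indexes str2 once by a canonical character-set key and looks each str1 word up, instead of rescanning str2 per word (objective: faster).

-- ===== PORT A =====
def Dup2Com (s1 : String) (s2 : String) : Bool :=
  let st1 := PySem.Set.ofList (PySem.List.sorted s1.toList (fun c => c) false)
  let st2 := PySem.Set.ofList (PySem.List.sorted s2.toList (fun c => c) false)
  if PySem.Set.equal st1 st2 then true else false

-- inner 'for j in str2' loop with its break
def gassInner (i : String) (res : List String) : List String → List String
  | [] => res
  | j :: rest =>
    if i == j then res ++ [j]
    else if Dup2Com i j then res ++ [j]
    else gassInner i res rest

def gassWords (str1 : List String) (str2 : List String) : List String :=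
  str1.foldl (fun res i => gassInner i res str2) []

-- ===== PORT B =====
-- tuple(sorted(set(s)))
def gassKey (s : String) : List Char :=
  PySem.List.sorted (PySem.Set.ofList s.toList) (fun c => c) false

def gassWords_alt (str1 : List String) (str2 : List String) : List String :=
  let index := str2.foldl (fun d j =>
      if d.contains (gassKey j) then d else d.insert (gassKey j) j)
    (PySem.Dict.empty : PySem.Dict (List Char) String)
  str1.foldl (fun res i =>
    match index.get? (gassKey i) with
    | some j => res ++ [j]
    | none => res) []

-- ===== PRECONDITION & SPEC =====
def Spec_gassWords (str1 : List String) (str2 : List String) (out : List String) : Prop := out = gassWords_alt str1 str2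
instance (str1 : List String) (str2 : List String) (out : List String) : Decidable (Spec_gassWords str1 str2 out) := by unfold Spec_gassWords; infer_instance

-- ===== CLAIM (what is proved, stated in full; the proofs are below) =====
def Claim_equal_gassWords : Prop := ∀ (str1 : List String) (str2 : List String), Dom_gassWords str1 str2 → Spec_gassWords str1 str2 (gassWords str1 str2)

-- ===== LEMMAS AND PROOFS =====

theorem mem_gassKey (s : String) (c : Char) : c ∈ gassKey s ↔ c ∈ s.toList := by
  simp [gassKey, PySem.List.mem_sorted, PySem.Set.mem_ofList]

theorem pairwise_gassKey (s : String) : (gassKey s).Pairwise (· < ·) :=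
  PySem.List.sorted_ofList_pairwise_lt s.toList

theorem nodup_gassKey (s : String) : (gassKey s).Nodup :=
  (pairwise_gassKey s).imp (fun h => ne_of_lt h)

theorem key_eq_iff (i j : String) : gassKey i = gassKey j ↔ (∀ x, x ∈ i.toList ↔ x ∈ j.toList) := by
  constructor
  · intro h x
    rw [← mem_gassKey, h, mem_gassKey]
  · intro h
    have hperm : (gassKey j).Perm (PySem.Set.ofList i.toList) := by
      refine (List.perm_ext_iff_of_nodup (nodup_gassKey j) (PySem.Set.nodup_ofList _)).2 ?_
      intro a
      rw [mem_gassKey, PySem.Set.mem_ofList]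
      exact (h a).symm
    exact PySem.List.sorted_eq_of_perm_of_pairwise_lt _ _ (fun c => c) hperm (pairwise_gassKey j)

theorem dup2Com_eq (i j : String) : Dup2Com i j = decide (gassKey i = gassKey j) := by
  unfold Dup2Com
  by_cases h : gassKey i = gassKey j
  · have heq : PySem.Set.equal (PySem.Set.ofList (PySem.List.sorted i.toList (fun c => c) false))
        (PySem.Set.ofList (PySem.List.sorted j.toList (fun c => c) false)) = true := by
      rw [PySem.Set.equal_iff]
      intro x
      simp only [PySem.Set.mem_ofList, PySem.List.mem_sorted]
      have := (key_eq_iff i j).1 h x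
      rw [← mem_gassKey, ← mem_gassKey] at this ⊢
      exact this
    simp [heq, h]
  · have hne : ¬ (PySem.Set.equal (PySem.Set.ofList (PySem.List.sorted i.toList (fun c => c) false))
        (PySem.Set.ofList (PySem.List.sorted j.toList (fun c => c) false)) = true) := by
      rw [PySem.Set.equal_iff]
      intro hc
      refine h ((key_eq_iff i j).2 (fun x => ?_))
      have := hc x
      simpa [PySem.Set.mem_ofList, PySem.List.mem_sorted] using this
    simp only [Bool.not_eq_true] at hne
    simp [hne, h]

theorem inner_eq (i : String) (res : List String) (l : List String) :
    gassInner i res l =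
      match l.find? (fun j => gassKey j == gassKey i) with
      | some j => res ++ [j]
      | none => res := by
  induction l with
  | nil => rfl
  | cons j rest ih =>
    rw [gassInner, List.find?_cons]
    by_cases hk : gassKey j = gassKey i
    · have hd : Dup2Com i j = true := by
        rw [dup2Com_eq]; simp [hk.symm]
      by_cases hij : i = j
      · simp [hij, hk]
      · have hb : (i == j) = false := by simp [hij]
        simp [hb, hd, hk]
    · have hij : i ≠ j := fun h => hk (by rw [h])
      have hd : Dup2Com i j = false := by
        rw [dup2Com_eq]
        simp only [decide_eq_false_iff_not]
        exact fun h => hk h.symm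
      have hb : (i == j) = false := by simp [hij]
      simp only [hb, hd, if_false, Bool.false_eq_true]
      have hkb : (gassKey j == gassKey i) = false := by simp [hk]
      rw [hkb]
      exact ih

theorem index_get? (l : List String) (d : PySem.Dict (List Char) String) (k : List Char) :
    (l.foldl (fun d j => if d.contains (gassKey j) then d else d.insert (gassKey j) j) d).get? k
      = (d.get? k).or (l.find? (fun j => gassKey j == k)) := by
  induction l generalizing d with
  | nil => simp
  | cons j rest ih =>
    rw [List.foldl_cons, List.find?_cons]
    by_cases hc : d.contains (gassKey j) = true
    · have hsome : (d.get? (gassKey j)).isSome := by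
        rw [← PySem.Dict.contains_eq_isSome_get?]; exact hc
      simp only [hc, if_true]
      rw [ih]
      by_cases hk : (gassKey j == k) = true
      · have hk' : gassKey j = k := by simpa using hk
        obtain ⟨v, hv⟩ := Option.isSome_iff_exists.1 hsome
        rw [hk'] at hv
        simp [hk, hv]
      · simp only [Bool.not_eq_true] at hk
        simp [hk]
    · simp only [Bool.not_eq_true] at hc
      simp only [hc, if_false, Bool.false_eq_true]
      rw [ih]
      by_cases hk : (gassKey j == k) = true
      · have hk' : gassKey j = k := by simpa using hk
        have hnone : d.get? k = none := by
          rw [← hk', PySem.Dict.get?_eq_none_iff_contains, hc]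
        rw [PySem.Dict.get?_insert]
        simp [hk', hnone]
      · have hne : k ≠ gassKey j := fun h => by simp [h] at hk
        rw [PySem.Dict.get?_insert]
        simp only [Bool.not_eq_true] at hk
        simp [hne, hk]

-- ===== VERDICT (by name: the statement is the Claim_ definition above) =====
theorem gassWords_spec : Claim_equal_gassWords := by
  intro str1 str2 _
  unfold Spec_gassWords gassWords gassWords_alt
  refine PySem.List.foldl_congr_mem str1 (fun res i => gassInner i res str2)
    (fun res i =>
      match (str2.foldl (fun d j => if d.contains (gassKey j) then d
          else d.insert (gassKey j) j) (PySem.Dict.empty : PySem.Dict (List Char) String)).get?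
          (gassKey i) with
      | some j => res ++ [j]
      | none => res) [] ?_
  intro res i _
  simp only []
  rw [inner_eq, index_get?]
  simp only [PySem.Dict.get?_empty, Option.or]
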